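-- pv_equiv track=rewrite | github.com/piyushCodes7/BODHI | Aaradhya/backend/app/expenses/service.py | compute_equal_splits
-- ===== SOURCE A (Python) =====
-- def compute_equal_splits(total: int, user_ids: list[str]) -> dict[str, int]:
--     """
--     Divide `total` paise equally. Remainder goes to the first participant
--     (arbitrary but deterministic).
--     """
--     n = len(user_ids)
--     base = total // n
--     remainder = total % n
--     result: dict[str, int] = {}
--     for i, uid in enumerate(user_ids):
--         result[uid] = base + (1 if i < remainder else 0)
--     return result
-- ===== SOURCE B (Python) =====
-- def compute_equal_splits(total: int, user_ids: list[str]) -> dict[str, int]: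
--     # Greedy peel: each participant takes the ceiling of the remaining amount
--     # divided by the number of participants still unpaid. This provably gives
--     # the first (total % n) participants one extra paise and the rest the base.
--     result: dict[str, int] = {}
--     remaining = total
--     k = len(user_ids)
--     for uid in user_ids:
--         share = -(-remaining // k)  # ceiling division
--         result[uid] = share
--         remaining -= share
--         k -= 1
--     return result
-- ===== Notes on version B (the rewrite author's own statement) =====
-- stated objective: alternative
-- what changed: B never computes total//n or total%n: it greedily peels one participant at a time, giving each the ceiling of remaining/k over the k still-unpaid participants and updating the remaining amount, instead of A's precomputed base/remainder with a per-index comparison.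
import Mathlib
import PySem

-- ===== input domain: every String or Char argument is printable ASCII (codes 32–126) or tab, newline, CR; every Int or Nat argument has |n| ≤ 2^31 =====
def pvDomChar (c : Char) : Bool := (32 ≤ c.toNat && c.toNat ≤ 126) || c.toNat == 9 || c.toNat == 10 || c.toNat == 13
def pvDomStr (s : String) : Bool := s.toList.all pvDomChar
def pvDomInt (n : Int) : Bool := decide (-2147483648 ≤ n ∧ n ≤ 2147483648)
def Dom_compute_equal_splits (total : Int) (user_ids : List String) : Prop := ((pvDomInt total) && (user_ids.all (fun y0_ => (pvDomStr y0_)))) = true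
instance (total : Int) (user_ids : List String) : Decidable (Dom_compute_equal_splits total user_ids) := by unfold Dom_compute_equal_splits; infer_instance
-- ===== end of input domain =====

-- B replaces A's precomputed base/remainder + per-index conditional with a greedy peel:
-- each participant takes the ceiling of remaining/k over the k still-unpaid ones ("alternative").

-- ===== PORT A =====
def compute_equal_splits (total : Int) (user_ids : List String) : List (String × Int) :=
  let n : Int := user_ids.length
  let base := PySem.Int.floordiv total n
  let remainder := PySem.Int.mod total n
  let result : PySem.Dict String Int :=
    (PySem.List.enumerate user_ids 0).foldl
      (fun d p => d.insert p.2 (base + (if p.1 < remainder then 1 else 0)))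
      PySem.Dict.empty
  result.items

-- ===== PORT B =====
def compute_equal_splits_alt (total : Int) (user_ids : List String) : List (String × Int) :=
  let s := user_ids.foldl
    (fun (s : PySem.Dict String Int × Int × Int) uid =>
      let share := -(PySem.Int.floordiv (-s.2.1) s.2.2)   -- ceiling division
      (s.1.insert uid share, s.2.1 - share, s.2.2 - 1))
    (PySem.Dict.empty, total, (user_ids.length : Int))
  s.1.items

-- ===== PRECONDITION & SPEC =====
-- Pre_ excludes only the empty participant list, on which A raises ZeroDivisionError.
def Pre_compute_equal_splits (total : Int) (user_ids : List String) : Prop := user_ids ≠ []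
instance (total : Int) (user_ids : List String) : Decidable (Pre_compute_equal_splits total user_ids) := by unfold Pre_compute_equal_splits; infer_instance
def pvWitness_compute_equal_splits : Int × List String := (10, ["a", "b", "c"])

def Spec_compute_equal_splits (total : Int) (user_ids : List String) (out : List (String × Int)) : Prop := out = compute_equal_splits_alt total user_ids
instance (total : Int) (user_ids : List String) (out : List (String × Int)) : Decidable (Spec_compute_equal_splits total user_ids out) := by unfold Spec_compute_equal_splits; infer_instance

-- ===== CLAIM (what is proved, stated in full; the proofs are below) =====
def Claim_equal_compute_equal_splits : Prop := ∀ (total : Int) (user_ids : List String), Dom_compute_equal_splits total user_ids → Pre_compute_equal_splits total user_ids → Spec_compute_equal_splits total user_ids (compute_equal_splits total user_ids)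

-- ===== LEMMAS AND PROOFS =====

-- the positional share list (r copies of base+1, then base) written as A's enumerate-map
lemma zip_shares_eq (us : List String) (base r : Int) (hr : 0 ≤ r) (hrn : r ≤ (us.length : Int)) :
    us.zip (List.replicate r.toNat (base + 1) ++ List.replicate (us.length - r.toNat) base)
      = (PySem.List.enumerate us 0).map (fun p => (p.2, base + (if p.1 < r then 1 else 0))) := by
  have hrle : r.toNat ≤ us.length := by omega
  apply List.ext_getElem
  · simp [PySem.List.length_enumerate]
    omega
  · intro k hk1 hk2
    have hklen : k < us.length := by
      simp at hk1; omega
    have hshare : (List.replicate r.toNat (base + 1) ++ List.replicate (us.length - r.toNat) base)[k]'(by simp; omega)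
        = if k < r.toNat then base + 1 else base := by
      by_cases hkr : k < r.toNat
      · rw [List.getElem_append_left (by simpa using hkr)]
        simp [hkr]
      · rw [List.getElem_append_right (by simpa using hkr)]
        simp [hkr]
    simp only [List.getElem_zip, List.getElem_map, PySem.List.getElem_enumerate, hshare]
    have : (k : Int) < r ↔ k < r.toNat := by omega
    by_cases hkr : k < r.toNat
    · simp [hkr, this.mpr hkr]
    · have : ¬ ((k : Int) < r) := fun h => hkr (this.mp h)
      simp [hkr, this]

-- B's greedy peel, started at remaining = base*|us| + r with 0 ≤ r ≤ |us|, inserts exactly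
-- the positional share list; its remaining and counter end at 0.
lemma peel_eq (us : List String) (base r : Int) (d : PySem.Dict String Int)
    (hr : 0 ≤ r) (hrn : r ≤ (us.length : Int)) :
    us.foldl
      (fun (s : PySem.Dict String Int × Int × Int) uid =>
        let share := -(PySem.Int.floordiv (-s.2.1) s.2.2)
        (s.1.insert uid share, s.2.1 - share, s.2.2 - 1))
      (d, base * us.length + r, (us.length : Int))
      = ((us.zip (List.replicate r.toNat (base + 1) ++ List.replicate (us.length - r.toNat) base)).foldl
          (fun d p => d.insert p.1 p.2) d, 0, 0) := by
  induction us generalizing base r d with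
  | nil =>
    have : r = 0 := by simpa using le_antisymm (by simpa using hrn) hr
    simp [this]
  | cons u us ih =>
    have hk : (0 : Int) < ((u :: us).length : Int) := by
      simp
    set k : Int := ((u :: us).length : Int) with hkdef
    have hklen : k = (us.length : Int) + 1 := by simp [hkdef]
    by_cases hr0 : 0 < r
    · -- first participant takes base + 1
      have hshare : -(PySem.Int.floordiv (-(base * k + r)) k) = base + 1 := by
        rw [PySem.Int.neg_floordiv_neg_eq_iff_of_pos hk]
        constructor <;> nlinarith
      have hrt : r.toNat = (r - 1).toNat + 1 := by omega
      have hrepl : List.replicate r.toNat (base + 1) ++ List.replicate ((u :: us).length - r.toNat) base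
          = (base + 1) :: (List.replicate (r - 1).toNat (base + 1) ++ List.replicate (us.length - (r - 1).toNat) base) := by
        rw [hrt]
        simp [List.replicate_succ]
      have hrem : base * k + r - (base + 1) = base * (us.length : Int) + (r - 1) := by
        rw [hklen]; ring
      simp only [List.foldl_cons, hshare, hrem, hrepl]
      have := ih base (r - 1) (d.insert u (base + 1)) (by omega) (by omega)
      simpa [hklen] using this
    · -- r = 0: everyone left takes base
      have hr0' : r = 0 := le_antisymm (by omega) hr
      have hshare : -(PySem.Int.floordiv (-(base * k + r)) k) = base := by
        rw [PySem.Int.neg_floordiv_neg_eq_iff_of_pos hk]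
        constructor <;> nlinarith
      have hrem : base * k + r - base = base * (us.length : Int) + 0 := by
        rw [hklen, hr0']; ring
      have hrepl : List.replicate r.toNat (base + 1) ++ List.replicate ((u :: us).length - r.toNat) base
          = base :: (List.replicate (0 : Int).toNat (base + 1) ++ List.replicate (us.length - (0 : Int).toNat) base) := by
        simp [hr0', List.replicate_succ]
      simp only [List.foldl_cons, hshare, hrem, hrepl]
      have := ih base 0 (d.insert u base) le_rfl (by positivity)
      simpa [hklen] using this

theorem compute_equal_splits_spec_aux (total : Int) (user_ids : List String)
    (hne : user_ids ≠ []) :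
    compute_equal_splits total user_ids = compute_equal_splits_alt total user_ids := by
  unfold compute_equal_splits compute_equal_splits_alt
  have hn : (0 : Int) < user_ids.length := by
    have : 0 < user_ids.length := List.length_pos_of_ne_nil hne
    exact_mod_cast this
  set n : Int := (user_ids.length : Int) with hndef
  set base := PySem.Int.floordiv total n with hbdef
  set r := PySem.Int.mod total n with hrdef
  have hmod : r = total % n := by rw [hrdef, PySem.Int.mod_eq_emod_of_pos hn]
  have hr0 : 0 ≤ r := by rw [hmod]; exact Int.emod_nonneg total (by omega)
  have hrn : r ≤ n := le_of_lt (by rw [hmod]; exact Int.emod_lt_of_pos total hn)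
  have htot : base * n + r = total := by
    have := PySem.Int.floordiv_mul_add_mod total n
    rw [← hbdef, ← hrdef] at this
    linarith
  -- rewrite B's fold start and apply the peel lemma
  conv_rhs => rw [← htot]
  rw [peel_eq user_ids base r PySem.Dict.empty hr0 hrn]
  show (PySem.Dict.items _) = (PySem.Dict.items _)
  congr 1
  rw [zip_shares_eq user_ids base r hr0 hrn, List.foldl_map]

-- ===== VERDICT (by name: the statement is the Claim_ definition above) =====
theorem compute_equal_splits_spec : Claim_equal_compute_equal_splits := by
  intro total user_ids _ hpre
  exact compute_equal_splits_spec_aux total user_ids hpre
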